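-- pv_equiv track=rewrite | github.com/alyssating/CS101-APTs | APT7/PickyEater.py | dinner
-- ===== SOURCE A (Python) =====
-- def dinner(foods, willEat, hunger, meal):
--     '''
--     foods (list of strings) - parallel list with willEat of the foods picky
--         eater is willing to eat.
--     willEat (list of ints) - parallel list with foods of how much of that food
--         the picky eater is willing to eat.
--     hunger (int) - how much food the picky eater needs to eat to be full.
--     meal (list of strings) - the list and order of the foods given to the picky
--         eater.
--
--     Return how much food the picky eater still needs to eat to be full.
--     '''
--
--     dict = {}
--     for i in range(len(foods)):
--         if foods[i] not in dict:
--             dict[foods[i]] = willEat[i]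
--
--     hunger = hunger
--     length = len(meal)
--     for food in meal:
--         if dict[food] > 0:
--             hunger -= 1
--             dict[food] -= 1
--         length -= 1
--
--     if hunger <= 0:
--         return 0
--     return hunger
-- ===== SOURCE B (Python) =====
-- def dinner(foods, willEat, hunger, meal):
--     # Batch computation: first-occurrence dict, count the meal once, sum min(count, budget).
--     d = {}
--     for i, f in enumerate(foods):
--         if f not in d:
--             d[f] = willEat[i]
--     counts = {}
--     for f in meal:
--         counts[f] = counts.get(f, 0) + 1
--     eaten = 0
--     for f, c in counts.items():
--         avail = d[f]
--         if avail > 0: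
--             eaten += min(c, avail)
--     remaining = hunger - eaten
--     return 0 if remaining <= 0 else remaining
-- ===== Notes on version B (the rewrite author's own statement) =====
-- stated objective: alternative
-- what changed: A simulates the meal bite by bite, decrementing hunger and a mutable per-food budget one unit at a time; B counts the meal once into a frequency dict, sums min(count, budget) over the counted foods, and clamps hunger - eaten at 0.
import Mathlib
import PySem

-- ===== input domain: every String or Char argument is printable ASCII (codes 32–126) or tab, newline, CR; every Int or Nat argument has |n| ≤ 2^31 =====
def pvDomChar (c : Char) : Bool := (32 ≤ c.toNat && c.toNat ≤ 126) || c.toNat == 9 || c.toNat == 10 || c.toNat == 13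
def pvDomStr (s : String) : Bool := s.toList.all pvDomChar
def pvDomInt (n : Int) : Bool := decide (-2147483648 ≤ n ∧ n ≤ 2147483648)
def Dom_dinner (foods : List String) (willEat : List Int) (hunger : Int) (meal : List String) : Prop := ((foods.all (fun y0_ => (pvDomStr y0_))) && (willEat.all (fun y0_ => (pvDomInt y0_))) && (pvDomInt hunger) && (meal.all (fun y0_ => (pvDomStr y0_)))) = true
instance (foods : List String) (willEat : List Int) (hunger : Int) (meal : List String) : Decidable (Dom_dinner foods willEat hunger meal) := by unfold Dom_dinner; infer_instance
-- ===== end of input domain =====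

-- B replaces A's per-unit simulation of the meal (mutable dict, hunger decremented one bite
-- at a time) by a batch computation: count the meal once, then sum min(count, capacity) over
-- the dict entries; objective: alternative (same asymptotic cost, different algorithm).

-- ===== PORT A =====
-- Literal port of A. Python raises IndexError (willEat[i] missing) / KeyError (meal food not
-- in dict); there the PySem getD defaults are never the claimed value — Pre_dinner excludes
-- exactly those inputs.
def dinner (foods : List String) (willEat : List Int) (hunger : Int) (meal : List String) : Int :=
  let d : PySem.Dict String Int :=
    (PySem.List.pyRange 0 (foods.length : Int) 1).foldl
      (fun d i =>
        if d.contains (PySem.List.pyGetD foods i "") then d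
        else d.insert (PySem.List.pyGetD foods i "") (PySem.List.pyGetD willEat i 0))
      PySem.Dict.empty
  let st := meal.foldl
      (fun (st : PySem.Dict String Int × Int × Int) food =>
        if st.1.getD food 0 > 0 then
          (st.1.insert food (st.1.getD food 0 - 1), st.2.1 - 1, st.2.2 - 1)
        else (st.1, st.2.1, st.2.2 - 1))
      (d, hunger, (meal.length : Int))
  if st.2.1 ≤ 0 then 0 else st.2.1

-- ===== PORT B =====
def dinner_alt (foods : List String) (willEat : List Int) (hunger : Int) (meal : List String) : Int :=
  let d : PySem.Dict String Int :=
    (PySem.List.enumerate foods).foldl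
      (fun d p => if d.contains p.2 then d else d.insert p.2 (PySem.List.pyGetD willEat p.1 0))
      PySem.Dict.empty
  let counts : PySem.Dict String Int :=
    meal.foldl (fun c f => c.insert f (c.getD f 0 + 1)) PySem.Dict.empty
  let eaten : Int := counts.items.foldl
      (fun acc p => if d.getD p.1 0 > 0 then acc + min p.2 (d.getD p.1 0) else acc) 0
  let remaining := hunger - eaten
  if remaining ≤ 0 then 0 else remaining

-- ===== PRECONDITION & SPEC =====
-- Pre_dinner holds exactly when Python A returns: the first conjunct rules out the IndexError
-- (a food whose first occurrence lies beyond willEat's length), the second the KeyError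
-- (a meal food absent from foods); Python B raises on exactly the same inputs. The PORTS are
-- total (PySem getD defaults) and in fact agree on every input: the proof below never needs Pre_.
def Pre_dinner (foods : List String) (willEat : List Int) (hunger : Int) (meal : List String) : Prop :=
  (∀ i (h : i < foods.length), willEat.length ≤ i →
      foods[i] ∈ foods.take (min willEat.length foods.length)) ∧
  (∀ f ∈ meal, f ∈ foods)
instance (foods : List String) (willEat : List Int) (hunger : Int) (meal : List String) : Decidable (Pre_dinner foods willEat hunger meal) := by unfold Pre_dinner; infer_instance
def pvWitness_dinner : List String × List Int × Int × List String :=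
  (["a", "b"], [2, 1], 5, ["a", "a", "b"])
def Spec_dinner (foods : List String) (willEat : List Int) (hunger : Int) (meal : List String) (out : Int) : Prop := out = dinner_alt foods willEat hunger meal
instance (foods : List String) (willEat : List Int) (hunger : Int) (meal : List String) (out : Int) : Decidable (Spec_dinner foods willEat hunger meal out) := by unfold Spec_dinner; infer_instance

-- ===== CLAIM (what is proved, stated in full; the proofs are below) =====
def Claim_equal_dinner : Prop := ∀ (foods : List String) (willEat : List Int) (hunger : Int) (meal : List String), Dom_dinner foods willEat hunger meal → Pre_dinner foods willEat hunger meal → Spec_dinner foods willEat hunger meal (dinner foods willEat hunger meal)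

-- ===== LEMMAS AND PROOFS =====

-- the conditional first-occurrence insertion step shared (after rewriting) by both dict builds
def pvG (d : PySem.Dict String Int) (p : String × Int) : PySem.Dict String Int :=
  if d.contains p.1 then d else d.insert p.1 p.2

-- units eaten by A's meal loop, as a recursion on the meal
def pvE (d : PySem.Dict String Int) : List String → Int
  | [] => 0
  | f :: r => if d.getD f 0 > 0 then 1 + pvE (d.insert f (d.getD f 0 - 1)) r else pvE d r

-- contribution of one dict entry in B's batch sum
def pvPay (meal : List String) (p : String × Int) : Int :=
  if p.2 > 0 then min ((meal.count p.1 : Int)) p.2 else 0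

theorem pvG_foldl_nodup (ps : List (String × Int)) (d : PySem.Dict String Int)
    (h : d.keys.Nodup) : (ps.foldl pvG d).keys.Nodup := by
  induction ps generalizing d with
  | nil => exact h
  | cons p ps ih =>
    refine ih _ ?_
    unfold pvG; split
    · exact h
    · exact PySem.Dict.nodup_keys_insert _ _ _ h

-- A's hunger accumulator equals hunger minus the eaten count pvE
theorem pvA_loop (meal : List String) (d : PySem.Dict String Int) (h l : Int) :
    (meal.foldl
      (fun (st : PySem.Dict String Int × Int × Int) food =>
        if st.1.getD food 0 > 0 then
          (st.1.insert food (st.1.getD food 0 - 1), st.2.1 - 1, st.2.2 - 1)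
        else (st.1, st.2.1, st.2.2 - 1))
      (d, h, l)).2.1 = h - pvE d meal := by
  induction meal generalizing d h l with
  | nil => simp [pvE]
  | cons f r ih =>
    simp only [List.foldl_cons, pvE]
    by_cases hf : d.getD f 0 > 0
    · rw [if_pos hf, if_pos hf, ih]; ring
    · rw [if_neg hf, if_neg hf, ih]

-- sum of the per-key indicator over the items of a nodup-key dict containing f is 1
theorem pv_indicator_sum (d : PySem.Dict String Int) (f : String)
    (hnd : d.keys.Nodup) (hc : d.contains f = true) :
    (d.items.map (fun p => if p.1 == f then (1 : Int) else 0)).sum = 1 := by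
  rw [PySem.List.sum_map_ite_one_zero (fun p => p.1 == f) d.items]
  have hcount : List.count f d.keys = d.items.countP (fun p => p.1 == f) := by
    rw [List.count, show d.keys = d.items.map (·.1) from rfl, List.countP_map]
    rfl
  rw [← hcount, List.count_eq_one_of_mem hnd ((PySem.Dict.contains_iff_mem_keys d f).1 hc)]
  rfl

-- core: the per-unit simulation equals the batch sum of minimums
theorem pvE_eq_sum (meal : List String) (d : PySem.Dict String Int) (hnd : d.keys.Nodup) :
    pvE d meal = (d.items.map (pvPay meal)).sum := by
  induction meal generalizing d with
  | nil =>
    rw [show pvE d [] = 0 from rfl]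
    rw [List.map_congr_left (f := pvPay []) (g := fun _ => (0 : Int)) ?_]
    · simp
    · intro p _; unfold pvPay; split
      · simp_all; omega
      · rfl
  | cons f r ih =>
    rw [show pvE d (f :: r) = if d.getD f 0 > 0 then 1 + pvE (d.insert f (d.getD f 0 - 1)) r
        else pvE d r from rfl]
    by_cases ha : d.getD f 0 > 0
    · have hc : d.contains f = true := by
        by_contra h
        rw [PySem.Dict.getD_of_not_contains d 0 (by simpa using h)] at ha
        omega
      rw [if_pos ha, ih _ (PySem.Dict.nodup_keys_insert _ _ _ hnd),
          PySem.Dict.items_insert_of_contains d _ hc, List.map_map]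
      have hpt : ∀ p ∈ d.items, pvPay (f :: r) p =
          ((pvPay r) ∘ (fun p => if (p.1 == f) = true then (f, d.getD f 0 - 1) else p)) p
            + (if p.1 == f then (1 : Int) else 0) := by
        intro p hp
        by_cases hpf : p.1 = f
        · have hv : p.2 = d.getD f 0 := by
            rcases p with ⟨k, v⟩
            simp only at hpf; subst hpf
            exact (PySem.Dict.getD_of_mem_items d hp hnd 0).symm
          simp only [Function.comp_apply, hpf, beq_self_eq_true, if_pos]
          unfold pvPay
          simp only [hpf, List.count_cons_self]
          push_cast
          rw [← hv]
          split_ifs <;> omega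
        · have hne : (p.1 == f) = false := by simp [hpf]
          simp only [Function.comp_apply, hne, Bool.false_eq_true, if_false]
          unfold pvPay
          rw [List.count_cons_of_ne (fun h => hpf h.symm)]
          omega
      rw [List.map_congr_left hpt, PySem.List.sum_map_add_int,
          pv_indicator_sum d f hnd hc]
      ring
    · rw [if_neg ha, ih _ hnd]
      refine congrArg _ (List.map_congr_left ?_)
      intro p hp
      by_cases hpf : p.1 = f
      · have hv : p.2 = d.getD f 0 := by
          rcases p with ⟨k, v⟩
          simp only at hpf; subst hpf
          exact (PySem.Dict.getD_of_mem_items d hp hnd 0).symm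
        unfold pvPay
        rw [hv]
        simp [ha]
      · unfold pvPay
        rw [List.count_cons_of_ne (fun h => hpf h.symm)]

-- Python enumerate as a map over the index range
theorem pv_enumerate_eq (xs : List String) (s : Int) :
    PySem.List.enumerate xs s
      = (List.range xs.length).map (fun (i : Nat) => (s + (i : Int), xs.getD i "")) := by
  induction xs generalizing s with
  | nil => rfl
  | cons x t ih =>
    show (s, x) :: PySem.List.enumerate t (s + 1) = _
    rw [ih (s + 1)]
    simp only [List.length_cons, List.range_succ_eq_map, List.map_cons, List.map_map,
      Nat.cast_zero, add_zero, List.getD_cons_zero]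
    congr 1
    apply List.map_congr_left
    intro i _
    simp only [Function.comp_apply, List.getD_cons_succ]
    congr 1
    push_cast
    ring

-- B's enumerate-driven dict build equals A's index-driven one
theorem pv_dict_eq (foods : List String) (willEat : List Int) :
    ((PySem.List.enumerate foods).foldl
      (fun d p => if d.contains p.2 then d else d.insert p.2 (PySem.List.pyGetD willEat p.1 0))
      PySem.Dict.empty)
    = ((PySem.List.pyRange 0 (foods.length : Int) 1).foldl
      (fun d i =>
        if d.contains (PySem.List.pyGetD foods i "") then d
        else d.insert (PySem.List.pyGetD foods i "") (PySem.List.pyGetD willEat i 0))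
      PySem.Dict.empty) := by
  rw [pv_enumerate_eq foods 0, List.foldl_map,
      PySem.List.pyRange_zero_natCast, List.foldl_map]
  apply PySem.List.foldl_congr_mem
  intro acc i _
  simp [PySem.List.pyGetD_natCast]

-- A's dict has distinct keys
theorem pv_dict_nodup (foods : List String) (willEat : List Int) :
    ((PySem.List.pyRange 0 (foods.length : Int) 1).foldl
      (fun d i =>
        if d.contains (PySem.List.pyGetD foods i "") then d
        else d.insert (PySem.List.pyGetD foods i "") (PySem.List.pyGetD willEat i 0))
      PySem.Dict.empty).keys.Nodup := by
  rw [PySem.List.pyRange_zero_natCast, List.foldl_map]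
  rw [PySem.List.foldl_congr_mem (List.range foods.length) _
      (fun d i => pvG d (foods.getD i "", willEat.getD i 0)) PySem.Dict.empty
      (fun acc i _ => by simp [pvG, PySem.List.pyGetD_natCast])]
  rw [← List.foldl_map (f := fun i => (foods.getD i "", willEat.getD i 0)) (g := pvG)]
  exact pvG_foldl_nodup _ _ PySem.Dict.nodup_keys_empty

-- the items-indexed sum equals the distinct-meal-indexed sum
theorem pv_sum_bridge (meal : List String) (d : PySem.Dict String Int) (hnd : d.keys.Nodup) :
    (d.items.map (pvPay meal)).sum
      = ((PySem.Set.ofList meal).map (fun f => pvPay meal (f, d.getD f 0))).sum := by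
  rw [PySem.Dict.items_eq_map_keys d hnd 0, List.map_map]
  have hS : (PySem.Set.ofList meal).Nodup := PySem.Set.nodup_ofList meal
  rw [← List.sum_toFinset (pvPay meal ∘ fun k => (k, d.getD k 0)) hnd,
      ← List.sum_toFinset (fun f => pvPay meal (f, d.getD f 0)) hS]
  have h1 : d.keys.toFinset.sum (pvPay meal ∘ fun k => (k, d.getD k 0))
      = (d.keys.toFinset ∪ (PySem.Set.ofList meal).toFinset).sum
          (fun f => pvPay meal (f, d.getD f 0)) := by
    apply Finset.sum_subset Finset.subset_union_left
    intro x _ hx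
    have hxk : x ∉ d.keys := by simpa using hx
    have : d.getD x 0 = 0 := PySem.Dict.getD_of_not_contains d 0 (by
      by_contra hc
      exact hxk ((PySem.Dict.contains_iff_mem_keys d x).1 (by simpa using hc)))
    unfold pvPay
    simp [this]
  have h2 : (PySem.Set.ofList meal).toFinset.sum (fun f => pvPay meal (f, d.getD f 0))
      = (d.keys.toFinset ∪ (PySem.Set.ofList meal).toFinset).sum
          (fun f => pvPay meal (f, d.getD f 0)) := by
    apply Finset.sum_subset Finset.subset_union_right
    intro x _ hx
    have hxm : x ∉ meal := by
      intro hm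
      have hx' : x ∉ PySem.Set.ofList meal := by simpa using hx
      exact hx' ((PySem.Set.mem_ofList meal x).2 hm)
    have hcnt : meal.count x = 0 := List.count_eq_zero.2 hxm
    unfold pvPay
    simp only [hcnt, Nat.cast_zero]
    split
    · next hp => omega
    · rfl
  rw [h1, h2]

-- ===== VERDICT (by name: the statement is the Claim_ definition above) =====
theorem dinner_spec : Claim_equal_dinner := by
  intro foods willEat hunger meal _ _
  unfold Spec_dinner dinner dinner_alt
  simp only []
  rw [pvA_loop, pv_dict_eq foods willEat]
  set D := ((PySem.List.pyRange 0 (foods.length : Int) 1).foldl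
      (fun d i =>
        if d.contains (PySem.List.pyGetD foods i "") then d
        else d.insert (PySem.List.pyGetD foods i "") (PySem.List.pyGetD willEat i 0))
      PySem.Dict.empty) with hD
  have hnd : D.keys.Nodup := by rw [hD]; exact pv_dict_nodup foods willEat
  rw [PySem.Dict.foldl_insert_getD_add_one_eq_counter, PySem.Dict.items_counter,
      List.foldl_map]
  rw [PySem.List.foldl_congr_mem (PySem.Set.ofList meal) _
      (fun acc f => acc + pvPay meal (f, D.getD f 0)) 0 ?_]
  · rw [PySem.List.foldl_add, pvE_eq_sum meal D hnd, pv_sum_bridge meal D hnd]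
    split_ifs <;> omega
  · intro acc f _
    unfold pvPay
    by_cases hp : D.getD f 0 > 0 <;> simp [hp]
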